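-- pv_equiv track=rewrite | github.com/davyleroy/Agri-sol | Backend/location_api.py | parse_location_string
-- ===== SOURCE A (Python) =====
-- from typing import Dict, List, Optional
--
-- def parse_location_string(location_string: str) -> Dict[str, str]:
--     """Parse a location string into components"""
--     parts = [part.strip() for part in location_string.split(',')]
--
--     result = {'country': parts[-1] if parts else None}
--
--     if len(parts) >= 2:
--         result['province'] = parts[-2]
--     if len(parts) >= 3:
--         result['district'] = parts[-3]
--     if len(parts) >= 4:
--         result['sector'] = parts[-4]
--
--     return result
-- ===== SOURCE B (Python) =====
-- def parse_location_string(location_string):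
--     """Parse a location string into components"""
--     result = {}
--     s = location_string
--     for key in ('country', 'province', 'district', 'sector'):
--         cut = s.rfind(',')
--         result[key] = s[cut + 1:].strip()
--         if cut < 0:
--             break
--         s = s[:cut]
--     return result
-- ===== Notes on version B (the rewrite author's own statement) =====
-- stated objective: alternative
-- what changed: Instead of splitting the whole string into a parts list and indexing it from the end under len-guards, B never builds a parts list: it repeatedly rfinds the last comma, strips only the extracted tail, truncates the string, and stops after at most four extractions (or at the first missing comma).
import Mathlib
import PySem

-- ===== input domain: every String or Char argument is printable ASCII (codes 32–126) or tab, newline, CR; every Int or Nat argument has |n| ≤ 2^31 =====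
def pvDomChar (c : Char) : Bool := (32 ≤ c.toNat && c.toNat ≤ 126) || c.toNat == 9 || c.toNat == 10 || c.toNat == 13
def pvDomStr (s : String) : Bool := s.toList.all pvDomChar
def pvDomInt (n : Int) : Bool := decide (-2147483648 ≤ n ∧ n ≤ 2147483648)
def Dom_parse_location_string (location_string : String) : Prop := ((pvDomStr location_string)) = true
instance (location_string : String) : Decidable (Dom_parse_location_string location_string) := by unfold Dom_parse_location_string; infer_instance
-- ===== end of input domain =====

-- B avoids building a parts list: it repeatedly rfinds the last comma, strips only the extracted
-- tail and truncates the string, stopping after at most four extractions (alternative algorithm).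

-- ===== PORT A =====
def parse_location_string (location_string : String) : List (String × Option String) :=
  let parts := ((PySem.Str.split? location_string ",").getD []).map PySem.Str.strip
  let result : PySem.Dict String (Option String) :=
    PySem.Dict.insert PySem.Dict.empty "country"
      (if parts.isEmpty then none else PySem.List.pyGet? parts (-1))
  let result := if 2 ≤ parts.length then result.insert "province" (PySem.List.pyGet? parts (-2)) else result
  let result := if 3 ≤ parts.length then result.insert "district" (PySem.List.pyGet? parts (-3)) else result
  let result := if 4 ≤ parts.length then result.insert "sector" (PySem.List.pyGet? parts (-4)) else result
  result.items

-- ===== PORT B =====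
-- loop body of Source B: cut = s.rfind(','); result[key] = s[cut+1:].strip(); break if cut < 0; s = s[:cut]
def pvAltGo : List String → String → PySem.Dict String (Option String) → PySem.Dict String (Option String)
  | [], _, acc => acc
  | k :: ks, s, acc =>
      let cut := PySem.Str.rfind s ","
      let acc := acc.insert k (some (PySem.Str.strip (PySem.Str.slice s (some (cut + 1)) none)))
      if cut < 0 then acc else pvAltGo ks (PySem.Str.slice s none (some cut)) acc

def parse_location_string_alt (location_string : String) : List (String × Option String) :=
  (pvAltGo ["country", "province", "district", "sector"] location_string PySem.Dict.empty).items

-- ===== PRECONDITION & SPEC =====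
def Spec_parse_location_string (location_string : String) (out : List (String × Option String)) : Prop := out = parse_location_string_alt location_string
instance (location_string : String) (out : List (String × Option String)) : Decidable (Spec_parse_location_string location_string out) := by unfold Spec_parse_location_string; infer_instance

-- ===== CLAIM (what is proved, stated in full; the proofs are below) =====
def Claim_equal_parse_location_string : Prop := ∀ (location_string : String), Dom_parse_location_string location_string → Spec_parse_location_string location_string (parse_location_string location_string)

-- ===== LEMMAS AND PROOFS =====
theorem pv_go_ne_nil (sep : List Char) : ∀ (fuel : Nat) (l cur : List Char) (acc : List (List Char)),
    PySem.Chars.splitOn.go sep fuel l cur acc ≠ [] := by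
  intro fuel
  induction fuel with
  | zero => intro l cur acc; simp [PySem.Chars.splitOn.go]
  | succ n ih =>
    intro l cur acc
    cases l with
    | nil => simp [PySem.Chars.splitOn.go]
    | cons c rest =>
      rw [PySem.Chars.splitOn.go]
      split
      · exact ih _ _ _
      · exact ih _ _ _

theorem pv_splitOn_ne_nil (s : List Char) : PySem.Chars.splitOn s [','] ≠ [] :=
  pv_go_ne_nil [','] _ s [] []

theorem pv_go_comma (f : Nat) (rest cur : List Char) (acc : List (List Char)) :
    PySem.Chars.splitOn.go [','] (f+1) (','::rest) cur acc = PySem.Chars.splitOn.go [','] f rest [] (cur.reverse :: acc) := by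
  rw [PySem.Chars.splitOn.go]
  rw [if_pos (by simp [List.isPrefixOf])]
  simp

theorem pv_go_other (c : Char) (hc : c ≠ ',') (f : Nat) (rest cur : List Char) (acc : List (List Char)) :
    PySem.Chars.splitOn.go [','] (f+1) (c::rest) cur acc = PySem.Chars.splitOn.go [','] f rest (c::cur) acc := by
  rw [PySem.Chars.splitOn.go]
  rw [if_neg (by simp [List.isPrefixOf]; exact fun h => hc h.symm)]

theorem pv_splitOn_go_shape : ∀ (l : List Char) (fuel : Nat), l.length ≤ fuel → ∀ (cur : List Char) (acc : List (List Char)),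
    PySem.Chars.splitOn.go [','] fuel l cur acc =
      acc.reverse ++ List.modifyHead (cur.reverse ++ ·) (PySem.Chars.splitOn l [',']) := by
  intro l
  induction l with
  | nil =>
    intro fuel _ cur acc
    cases fuel with
    | zero => simp [PySem.Chars.splitOn.go, PySem.Chars.splitOn]
    | succ n => simp [PySem.Chars.splitOn.go, PySem.Chars.splitOn]
  | cons c rest ih =>
    intro fuel hf cur acc
    cases fuel with
    | zero => simp at hf
    | succ f =>
      have hrest : rest.length ≤ f := by simpa using hf
      by_cases hc : c = ','
      · subst hc
        rw [pv_go_comma, ih f hrest [] (cur.reverse :: acc)]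
        have hsplit : PySem.Chars.splitOn (',' :: rest) [','] = [] :: PySem.Chars.splitOn rest [','] := by
          rw [PySem.Chars.splitOn]
          simp only [List.length_cons]
          rw [pv_go_comma]; simp only [List.reverse_nil]; rw [ih (rest.length + 1) (by omega) [] [[]]]
          simp; cases PySem.Chars.splitOn rest [','] <;> simp
        rw [hsplit]
        simp
        cases PySem.Chars.splitOn rest [','] <;> simp
      · rw [pv_go_other c hc, ih f hrest (c :: cur) acc]
        have hsplit : PySem.Chars.splitOn (c :: rest) [','] = List.modifyHead (c :: ·) (PySem.Chars.splitOn rest [',']) := by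
          rw [PySem.Chars.splitOn]
          simp only [List.length_cons]
          rw [pv_go_other c hc, ih (rest.length + 1) (by omega) [c] []]
          obtain ⟨p, ps, hp⟩ := List.exists_cons_of_ne_nil (pv_splitOn_ne_nil rest)
          simp [hp]
        rw [hsplit]
        obtain ⟨p, ps, hp⟩ := List.exists_cons_of_ne_nil (pv_splitOn_ne_nil rest)
        simp [hp]

theorem pv_splitOn_nil : PySem.Chars.splitOn ([] : List Char) [','] = [[]] := by
  simp [PySem.Chars.splitOn, PySem.Chars.splitOn.go]

theorem pv_splitOn_cons_comma (rest : List Char) :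
    PySem.Chars.splitOn (',' :: rest) [','] = [] :: PySem.Chars.splitOn rest [','] := by
  rw [PySem.Chars.splitOn]
  simp only [List.length_cons]
  rw [pv_go_comma]; simp only [List.reverse_nil]; rw [pv_splitOn_go_shape rest (rest.length + 1) (by omega) [] [[]]]
  simp; cases PySem.Chars.splitOn rest [','] <;> simp

theorem pv_splitOn_cons_other (c : Char) (hc : c ≠ ',') (rest : List Char) :
    PySem.Chars.splitOn (c :: rest) [','] = List.modifyHead (c :: ·) (PySem.Chars.splitOn rest [',']) := by
  rw [PySem.Chars.splitOn]
  simp only [List.length_cons]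
  rw [pv_go_other c hc, pv_splitOn_go_shape rest (rest.length + 1) (by omega) [c] []]
  obtain ⟨p, ps, hp⟩ := List.exists_cons_of_ne_nil (pv_splitOn_ne_nil rest)
  simp [hp]

theorem pv_splitOn_no_comma : ∀ (s : List Char), ',' ∉ s → PySem.Chars.splitOn s [','] = [s] := by
  intro s
  induction s with
  | nil => intro _; exact pv_splitOn_nil
  | cons c rest ih =>
    intro h
    have hc : c ≠ ',' := fun e => h (by simp [e])
    rw [pv_splitOn_cons_other c hc, ih (fun m => h (List.mem_cons_of_mem _ m))]
    simp

theorem pv_splitOn_append : ∀ (u v : List Char),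
    PySem.Chars.splitOn (u ++ ',' :: v) [','] =
      PySem.Chars.splitOn u [','] ++ PySem.Chars.splitOn v [','] := by
  intro u v
  induction u with
  | nil => rw [List.nil_append, pv_splitOn_cons_comma, pv_splitOn_nil]; simp
  | cons c u ih =>
    by_cases hc : c = ','
    · subst hc
      rw [List.cons_append, pv_splitOn_cons_comma, pv_splitOn_cons_comma, ih]
      simp
    · rw [List.cons_append, pv_splitOn_cons_other c hc, pv_splitOn_cons_other c hc, ih]
      obtain ⟨p, ps, hp⟩ := List.exists_cons_of_ne_nil (pv_splitOn_ne_nil u)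
      simp [hp]

theorem pv_comma_prefix_mem (t : List Char) (h : List.isPrefixOf [','] t = true) : ',' ∈ t := by
  rw [List.isPrefixOf_iff_prefix] at h
  exact h.subset (by simp)

theorem pv_rfind_go_no_comma (s : List Char) (h : ',' ∉ s) : ∀ (k : Nat), PySem.Chars.rfind.go s [','] k = -1 := by
  intro k
  induction k with
  | zero =>
    rw [PySem.Chars.rfind.go]
    rw [if_neg (fun hp => h (pv_comma_prefix_mem s hp))]
  | succ j ih =>
    rw [PySem.Chars.rfind.go]
    rw [if_neg (fun hp => h (List.mem_of_mem_drop (pv_comma_prefix_mem _ hp)))]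
    exact ih

theorem pv_rfind_no_comma (s : List Char) (h : ',' ∉ s) : PySem.Chars.rfind s [','] = -1 := by
  rw [PySem.Chars.rfind]; exact pv_rfind_go_no_comma s h _

theorem pv_rfind_go_last (u v : List Char) (h : ',' ∉ v) :
    ∀ (k : Nat), u.length ≤ k → k ≤ u.length + 1 + v.length →
      PySem.Chars.rfind.go (u ++ ',' :: v) [','] k = (u.length : Int) := by
  intro k
  induction k with
  | zero =>
    intro h1 _
    have hu : u = [] := List.eq_nil_of_length_eq_zero (Nat.le_zero.mp h1)
    subst hu
    rw [PySem.Chars.rfind.go]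
    rw [if_pos (by simp [List.isPrefixOf])]
    simp
  | succ j ih =>
    intro h1 h2
    by_cases he : u.length = j + 1
    · rw [PySem.Chars.rfind.go]
      rw [if_pos (by rw [← he, List.drop_left]; simp [List.isPrefixOf])]
      rw [he]
    · have hj : u.length ≤ j := by omega
      rw [PySem.Chars.rfind.go]
      rw [if_neg ?_]
      · exact ih hj (by omega)
      · intro hp
        have hm := pv_comma_prefix_mem _ hp
        have hd : (u ++ ',' :: v).drop (j+1) = v.drop (j - u.length) := by
          have he2 : j + 1 = u.length + (1 + (j - u.length)) := by omega
          rw [he2, List.drop_length_add_append, Nat.add_comm, List.drop_succ_cons]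
        rw [hd] at hm
        exact h (List.mem_of_mem_drop hm)

theorem pv_rfind_last (u v : List Char) (h : ',' ∉ v) :
    PySem.Chars.rfind (u ++ ',' :: v) [','] = (u.length : Int) := by
  rw [PySem.Chars.rfind]
  exact pv_rfind_go_last u v h _ (by simp) (by simp; omega)

theorem pv_last_comma_split (s : List Char) (h : ',' ∈ s) :
    ∃ u v, s = u ++ ',' :: v ∧ ',' ∉ v := by
  induction s using List.reverseRecOn with
  | nil => simp at h
  | append_singleton l x ih =>
    by_cases hx : x = ','
    · exact ⟨l, [], by simp [hx], by simp⟩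
    · have hl : ',' ∈ l := by
        rcases List.mem_append.mp h with h1 | h1
        · exact h1
        · simp at h1; exact absurd h1.symm hx
      obtain ⟨u, v, rfl, hv⟩ := ih hl
      exact ⟨u, v ++ [x], by simp, by simp [hv]; exact fun e => hx e.symm⟩

def pvAltGoC : List String → List Char → PySem.Dict String (Option String) → PySem.Dict String (Option String)
  | [], _, acc => acc
  | k :: ks, s, acc =>
      let cut := PySem.Chars.rfind s [',']
      let acc := acc.insert k (some (String.ofList (PySem.Chars.strip (PySem.List.slice s (some (cut + 1)) none))))
      if cut < 0 then acc else pvAltGoC ks (PySem.List.slice s none (some cut)) acc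

def pvConsume : List String → List (List Char) → PySem.Dict String (Option String) → PySem.Dict String (Option String)
  | [], _, acc => acc
  | k :: ks, parts, acc =>
      let acc := acc.insert k (some (String.ofList (PySem.Chars.strip (parts.getLast?.getD []))))
      if parts.length ≤ 1 then acc else pvConsume ks parts.dropLast acc

theorem pv_alt_eq_consume (keys : List String) : ∀ (s : List Char) (acc : PySem.Dict String (Option String)),
    pvAltGoC keys s acc = pvConsume keys (PySem.Chars.splitOn s [',']) acc := by
  induction keys with
  | nil => intro s acc; rfl
  | cons k ks ih =>
    intro s acc
    by_cases hc : ',' ∈ s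
    · obtain ⟨u, v, rfl, hv⟩ := pv_last_comma_split s hc
      rw [pvAltGoC, pvConsume]
      rw [pv_rfind_last u v hv]
      rw [pv_splitOn_append u v, pv_splitOn_no_comma v hv]
      have hslice1 : PySem.List.slice (u ++ ',' :: v) (some ((u.length : Int) + 1)) none = v := by
        rw [show ((u.length : Int) + 1) = ((u.length + 1 : Nat) : Int) by push_cast; ring]
        rw [PySem.List.slice_from_natCast]
        rw [List.drop_length_add_append 1]
        simp
      have hslice2 : PySem.List.slice (u ++ ',' :: v) none (some (u.length : Int)) = u := by
        rw [PySem.List.slice_to_natCast]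
        simp
      have hlen : ¬ ((PySem.Chars.splitOn u [','] ++ [v]).length ≤ 1) := by
        obtain ⟨p, ps, hp⟩ := List.exists_cons_of_ne_nil (pv_splitOn_ne_nil u)
        simp [hp]
      rw [if_neg (by omega), if_neg hlen, hslice1, hslice2]
      simp only [List.getLast?_concat, Option.getD_some, List.dropLast_concat]
      exact ih u _
    · rw [pvAltGoC, pvConsume]
      rw [pv_rfind_no_comma s hc, pv_splitOn_no_comma s hc]
      norm_num

theorem pv_rev_get {α : Type} (L : List α) (k : Nat) (h0 : 0 < k) (hk : k ≤ L.length) :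
    PySem.List.pyGet? L.reverse (-(k : Int)) = L[k-1]? := by
  rw [PySem.List.pyGet?_neg_natCast _ k h0 (by simpa using hk)]
  rw [List.length_reverse, List.getElem?_reverse (by omega)]
  congr 1
  omega

theorem pv_ladder_eq_consume (P : List (List Char)) (h : P ≠ []) :
    (let parts := P.map (fun cs => String.ofList (PySem.Chars.strip cs))
     let result : PySem.Dict String (Option String) :=
       PySem.Dict.insert PySem.Dict.empty "country"
         (if parts.isEmpty then none else PySem.List.pyGet? parts (-1))
     let result := if 2 ≤ parts.length then result.insert "province" (PySem.List.pyGet? parts (-2)) else result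
     let result := if 3 ≤ parts.length then result.insert "district" (PySem.List.pyGet? parts (-3)) else result
     let result := if 4 ≤ parts.length then result.insert "sector" (PySem.List.pyGet? parts (-4)) else result
     result) = pvConsume ["country", "province", "district", "sector"] P PySem.Dict.empty := by
  obtain ⟨r, rfl⟩ : ∃ r : List (List Char), P = r.reverse :=
    ⟨P.reverse, (List.reverse_reverse P).symm⟩
  have hne : r ≠ [] := by simpa using h
  have hmap : ∀ (l : List (List Char)), l.reverse.map (fun cs => String.ofList (PySem.Chars.strip cs)) = (l.map (fun cs => String.ofList (PySem.Chars.strip cs))).reverse := by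
    intro l; rw [List.map_reverse]
  match r with
  | [] => exact absurd rfl hne
  | [a] =>
    have g1 := pv_rev_get ([a].map (fun cs => String.ofList (PySem.Chars.strip cs))) 1 (by omega) (by simp)
    simp at g1
    simp [pvConsume, g1, PySem.Dict.insert, PySem.Dict.contains, PySem.Dict.empty]
  | [a, b] =>
    have g1 := pv_rev_get ([a, b].map (fun cs => String.ofList (PySem.Chars.strip cs))) 1 (by omega) (by simp)
    have g2 := pv_rev_get ([a, b].map (fun cs => String.ofList (PySem.Chars.strip cs))) 2 (by omega) (by simp)
    simp at g1 g2
    simp [pvConsume, g1, g2, PySem.Dict.insert, PySem.Dict.contains, PySem.Dict.empty]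
  | [a, b, c] =>
    have g1 := pv_rev_get ([a, b, c].map (fun cs => String.ofList (PySem.Chars.strip cs))) 1 (by omega) (by simp)
    have g2 := pv_rev_get ([a, b, c].map (fun cs => String.ofList (PySem.Chars.strip cs))) 2 (by omega) (by simp)
    have g3 := pv_rev_get ([a, b, c].map (fun cs => String.ofList (PySem.Chars.strip cs))) 3 (by omega) (by simp)
    simp at g1 g2 g3
    simp [pvConsume, g1, g2, g3, PySem.Dict.insert, PySem.Dict.contains, PySem.Dict.empty]
  | a :: b :: c :: d :: t =>
    have g1 := pv_rev_get ((a::b::c::d::t).map (fun cs => String.ofList (PySem.Chars.strip cs))) 1 (by omega) (by simp)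
    have g2 := pv_rev_get ((a::b::c::d::t).map (fun cs => String.ofList (PySem.Chars.strip cs))) 2 (by omega) (by simp)
    have g3 := pv_rev_get ((a::b::c::d::t).map (fun cs => String.ofList (PySem.Chars.strip cs))) 3 (by omega) (by simp)
    have g4 := pv_rev_get ((a::b::c::d::t).map (fun cs => String.ofList (PySem.Chars.strip cs))) 4 (by omega) (by simp)
    simp at g1 g2 g3 g4
    simp [pvConsume, hmap, g1, g2, g3, g4, PySem.Dict.insert, PySem.Dict.contains, PySem.Dict.empty,
      show (2:Nat) ≤ t.length + 4 by omega, show (3:Nat) ≤ t.length + 4 by omega, show (4:Nat) ≤ t.length + 4 by omega]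


theorem pvAltGo_eq (keys : List String) : ∀ (s : String) (acc : PySem.Dict String (Option String)),
    pvAltGo keys s acc = pvAltGoC keys s.toList acc := by
  induction keys with
  | nil => intro s acc; rfl
  | cons k ks ih =>
    intro s acc
    rw [pvAltGo, pvAltGoC]
    have hcut : PySem.Str.rfind s "," = PySem.Chars.rfind s.toList [','] := by
      rw [PySem.Str.rfind_eq]; rfl
    have hval : PySem.Str.strip (PySem.Str.slice s (some (PySem.Str.rfind s "," + 1)) none) =
        String.ofList (PySem.Chars.strip (PySem.List.slice s.toList (some (PySem.Chars.rfind s.toList [','] + 1)) none)) := by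
      apply String.toList_injective
      rw [PySem.Str.toList_strip, PySem.Str.toList_slice, PySem.Chars.slice_eq_listSlice, hcut]
      simp
    rw [hval, hcut]
    by_cases hneg : PySem.Chars.rfind s.toList [','] < 0
    · rw [if_pos hneg, if_pos hneg]
    · rw [if_neg hneg, if_neg hneg, ih]
      congr 1
      rw [PySem.Str.toList_slice, PySem.Chars.slice_eq_listSlice]

theorem pv_parts_eq (s : String) :
    ((PySem.Str.split? s ",").getD []).map PySem.Str.strip =
      (PySem.Chars.splitOn s.toList [',']).map (fun cs => String.ofList (PySem.Chars.strip cs)) := by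
  have h := PySem.Str.split?_map s ","
  have hsep : (",":String).toList = [','] := rfl
  rw [hsep] at h
  rw [PySem.Chars.split?] at h
  rw [if_neg (by decide)] at h
  obtain ⟨L, hL, hmap⟩ := Option.map_eq_some_iff.mp h
  rw [hL]
  simp only [Option.getD_some]
  rw [← hmap, List.map_map]
  apply List.map_congr_left
  intro x _
  apply String.toList_injective
  simp [PySem.Str.toList_strip]

-- ===== VERDICT (by name: the statement is the Claim_ definition above) =====
theorem parse_location_string_spec : Claim_equal_parse_location_string := by
  intro s _
  unfold Spec_parse_location_string parse_location_string parse_location_string_alt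
  rw [pvAltGo_eq, pv_alt_eq_consume, pv_parts_eq]
  exact congrArg PySem.Dict.items (pv_ladder_eq_consume _ (pv_splitOn_ne_nil _))
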